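-- pv_equiv track=rewrite | github.com/pristavochka/misis | лаба 5/задание 7 уровень 2 лаба 5.py | finder_but_for_cols
-- ===== SOURCE A (Python) =====
-- def counter(array):
--     count = 0
--     for element in array:
--         if element > 0:
--             count += 1
--     return count
--
-- def finder_but_for_cols(o):
--     col = -1
--     max_count = -1
--     a = len(o)
--     b = len(o[0]) if a > 0 else 0
--     for j in range(b):
--         cl = [o[i][j] for i in range(a)]
--         count = counter(cl)
--         if count > max_count:
--             max_count = count
--             col = j
--     return col
-- ===== SOURCE B (Python) =====
-- def finder_but_for_cols(o):
--     b = len(o[0]) if o else 0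
--     counts = [0] * b
--     for row in o:
--         counts = [c + (1 if row[j] > 0 else 0) for j, c in enumerate(counts)]
--     col, best = -1, -1
--     for j, c in enumerate(counts):
--         if c > best:
--             col, best = j, c
--     return col
-- ===== Notes on version B (the rewrite author's own statement) =====
-- stated objective: faster
-- what changed: Replaces the column-major loop that rebuilds and rescans each column list with a single row-major pass maintaining a per-column positives tally, followed by one leftmost-argmax scan of the tallies.
import Mathlib
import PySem

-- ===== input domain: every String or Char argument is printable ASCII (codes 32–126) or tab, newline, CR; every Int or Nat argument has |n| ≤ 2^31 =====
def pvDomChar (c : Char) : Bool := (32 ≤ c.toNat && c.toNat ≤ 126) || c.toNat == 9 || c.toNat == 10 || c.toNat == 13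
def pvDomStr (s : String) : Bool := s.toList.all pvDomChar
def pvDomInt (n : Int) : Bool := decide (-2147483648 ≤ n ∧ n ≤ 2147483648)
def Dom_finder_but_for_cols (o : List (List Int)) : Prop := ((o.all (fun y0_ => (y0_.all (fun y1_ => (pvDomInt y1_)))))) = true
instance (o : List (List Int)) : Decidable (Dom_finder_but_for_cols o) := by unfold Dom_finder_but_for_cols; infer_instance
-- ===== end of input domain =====

-- B replaces A's column-major rebuild-and-rescan with a single row-major tally pass plus one argmax scan (constant-factor speedup).

-- ===== PORT A =====
def pvCounter (array : List Int) : Int :=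
  array.foldl (fun count element => if element > 0 then count + 1 else count) 0

def finder_but_for_cols (o : List (List Int)) : Int :=
  ((PySem.List.pyRange 0
      (if 0 < (o.length : Int) then ((PySem.List.pyGetD o 0 []).length : Int) else 0) 1).foldl
    (fun (s : Int × Int) j =>
      let cl := (PySem.List.pyRange 0 (o.length : Int) 1).map
        (fun i => PySem.List.pyGetD (PySem.List.pyGetD o i []) j 0)
      let count := pvCounter cl
      if count > s.2 then (j, count) else s)
    (-1, -1)).1

-- ===== PORT B =====
def finder_but_for_cols_alt (o : List (List Int)) : Int :=
  ((PySem.List.enumerate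
      (o.foldl
        (fun (counts : List Int) row =>
          (PySem.List.enumerate counts 0).map
            (fun p => p.2 + if PySem.List.pyGetD row p.1 0 > 0 then 1 else 0))
        (List.replicate (o.headD []).length (0 : Int))) 0).foldl
    (fun (s : Int × Int) p => if p.2 > s.2 then (p.1, p.2) else s)
    (-1, -1)).1

-- ===== PRECONDITION & SPEC =====
-- Pre_ excludes exactly the ragged matrices with some row shorter than the first row,
-- on which Python A raises IndexError (and Python B raises there too).
def Pre_finder_but_for_cols (o : List (List Int)) : Prop :=
  ∀ row ∈ o, (o.headD []).length ≤ row.length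
instance (o : List (List Int)) : Decidable (Pre_finder_but_for_cols o) := by
  unfold Pre_finder_but_for_cols; infer_instance
def pvWitness_finder_but_for_cols : List (List Int) := [[1, -2], [0, 3]]

def Spec_finder_but_for_cols (o : List (List Int)) (out : Int) : Prop := out = finder_but_for_cols_alt o
instance (o : List (List Int)) (out : Int) : Decidable (Spec_finder_but_for_cols o out) := by unfold Spec_finder_but_for_cols; infer_instance

-- ===== CLAIM (what is proved, stated in full; the proofs are below) =====
def Claim_equal_finder_but_for_cols : Prop := ∀ (o : List (List Int)), Dom_finder_but_for_cols o → Pre_finder_but_for_cols o → Spec_finder_but_for_cols o (finder_but_for_cols o)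

-- ===== LEMMAS AND PROOFS =====

theorem pvFoldlCongr {α β : Type} {l : List β} (f g : α → β → α) (init : α)
    (h : ∀ a x, x ∈ l → f a x = g a x) :
    List.foldl f init l = List.foldl g init l := by
  induction l generalizing init with
  | nil => rfl
  | cons x t ih =>
    simp only [List.foldl_cons]
    rw [h _ _ (List.mem_cons_self ..)]
    exact ih _ (fun a y hy => h a y (List.mem_cons_of_mem _ hy))

-- positives in "column j" (default 0 off the end, as both ports' pyGetD uses)
def pvColCnt (rs : List (List Int)) (j : Int) : Int :=
  rs.foldl (fun c row => c + if PySem.List.pyGetD row j 0 > 0 then 1 else 0) 0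

theorem pvColCnt_eq_sum (rs : List (List Int)) (j : Int) :
    pvColCnt rs j =
      (rs.map (fun row => if PySem.List.pyGetD row j 0 > 0 then (1 : Int) else 0)).sum := by
  unfold pvColCnt
  rw [PySem.List.foldl_add]
  simp

theorem pvColCnt_cons (r : List Int) (rs : List (List Int)) (j : Int) :
    pvColCnt (r :: rs) j =
      (if PySem.List.pyGetD r j 0 > 0 then 1 else 0) + pvColCnt rs j := by
  simp [pvColCnt_eq_sum]

-- one row-step of B's tally, applied to a range-shaped counts list
theorem pvStep_map (B : Nat) (g : Int → Int) (r : List Int) :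
    (PySem.List.enumerate ((PySem.List.pyRange 0 (B : Int) 1).map g) 0).map
        (fun p => p.2 + if PySem.List.pyGetD r p.1 0 > 0 then 1 else 0) =
      (PySem.List.pyRange 0 (B : Int) 1).map
        (fun j => g j + if PySem.List.pyGetD r j 0 > 0 then 1 else 0) := by
  rw [PySem.List.enumerate_eq_map_pyRange (d := 0)]
  simp only [PySem.List.len_eq, List.length_map, PySem.List.length_pyRange_one, List.map_map]
  have hlen : (((B : Int) - 0).toNat : Int) = (B : Int) := by omega
  rw [hlen]
  refine List.map_congr_left ?_
  intro j hj
  rw [PySem.List.mem_pyRange_one] at hj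
  simp only [Function.comp]
  rw [PySem.List.pyGetD_map_pyRange_of_nonneg g (B : Int) j 0 hj.1 hj.2]

-- B's tally loop characterised: starting from a range-shaped list it adds the column counts
theorem pvCounts_char (rs : List (List Int)) (B : Nat) (g : Int → Int) :
    rs.foldl
        (fun (counts : List Int) row =>
          (PySem.List.enumerate counts 0).map
            (fun p => p.2 + if PySem.List.pyGetD row p.1 0 > 0 then 1 else 0))
        ((PySem.List.pyRange 0 (B : Int) 1).map g) =
      (PySem.List.pyRange 0 (B : Int) 1).map (fun j => g j + pvColCnt rs j) := by
  induction rs generalizing g with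
  | nil => simp [pvColCnt]
  | cons r rs ih =>
    simp only [List.foldl_cons]
    rw [pvStep_map]
    rw [ih]
    refine List.map_congr_left ?_
    intro j _
    rw [pvColCnt_cons]
    ring

-- A's per-column count equals pvColCnt
theorem pvCounter_col (o : List (List Int)) (j : Int) :
    pvCounter ((PySem.List.pyRange 0 (o.length : Int) 1).map
        (fun i => PySem.List.pyGetD (PySem.List.pyGetD o i []) j 0)) =
      pvColCnt o j := by
  have h : (PySem.List.pyRange 0 (o.length : Int) 1).map
        (fun i => PySem.List.pyGetD (PySem.List.pyGetD o i []) j 0) =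
      ((PySem.List.pyRange 0 (o.length : Int) 1).map
        (fun i => PySem.List.pyGetD o i [])).map
        (fun row => PySem.List.pyGetD row j 0) := by
    rw [List.map_map]; rfl
  rw [h, PySem.List.map_pyGetD_pyRange_zero']
  unfold pvCounter pvColCnt
  rw [List.foldl_map]
  refine pvFoldlCongr _ _ _ ?_
  intro c row _
  split <;> omega

theorem pvB_eq (o : List (List Int)) :
    finder_but_for_cols_alt o =
      ((PySem.List.pyRange 0 ((o.headD []).length : Int) 1).foldl
        (fun (s : Int × Int) j => if pvColCnt o j > s.2 then (j, pvColCnt o j) else s)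
        (-1, -1)).1 := by
  unfold finder_but_for_cols_alt
  have hrep : List.replicate (o.headD []).length (0 : Int) =
      (PySem.List.pyRange 0 ((o.headD []).length : Int) 1).map (fun _ => (0 : Int)) := by
    rw [List.map_const', PySem.List.length_pyRange_one]
    simp
  rw [hrep, pvCounts_char]
  simp only [zero_add]
  rw [PySem.List.enumerate_eq_map_pyRange (d := 0)]
  simp only [PySem.List.len_eq, List.length_map, PySem.List.length_pyRange_one]
  have hlen : ((((o.headD []).length : Int) - 0).toNat : Int) = ((o.headD []).length : Int) := by
    omega
  rw [hlen]
  have hmap : (PySem.List.pyRange 0 ((o.headD []).length : Int) 1).map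
        (fun j => (j, PySem.List.pyGetD
          ((PySem.List.pyRange 0 ((o.headD []).length : Int) 1).map (fun j => pvColCnt o j)) j 0)) =
      (PySem.List.pyRange 0 ((o.headD []).length : Int) 1).map (fun j => (j, pvColCnt o j)) := by
    refine List.map_congr_left ?_
    intro j hj
    rw [PySem.List.mem_pyRange_one] at hj
    rw [PySem.List.pyGetD_map_pyRange_of_nonneg _ _ _ _ hj.1 hj.2]
  rw [hmap, List.foldl_map]

theorem pvA_eq (o : List (List Int)) :
    finder_but_for_cols o =
      ((PySem.List.pyRange 0 ((o.headD []).length : Int) 1).foldl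
        (fun (s : Int × Int) j => if pvColCnt o j > s.2 then (j, pvColCnt o j) else s)
        (-1, -1)).1 := by
  unfold finder_but_for_cols
  have hb : (if 0 < (o.length : Int) then ((PySem.List.pyGetD o 0 []).length : Int) else 0) =
      ((o.headD []).length : Int) := by
    cases o with
    | nil => simp
    | cons r rs => simp [PySem.List.pyGetD_zero_cons]
  rw [hb]
  congr 1
  refine pvFoldlCongr _ _ _ ?_
  intro s j _
  simp only [pvCounter_col]

-- ===== VERDICT (by name: the statement is the Claim_ definition above) =====
theorem finder_but_for_cols_spec : Claim_equal_finder_but_for_cols := by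
  intro o _ _
  unfold Spec_finder_but_for_cols
  rw [pvA_eq, pvB_eq]
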